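-- pv_equiv track=rewrite | github.com/jeppebayer/general_workflows | population_genetics/sfs/workflow_sources/monosites_retrieve.py | subtract_variants_from_region
-- ===== SOURCE A (Python) =====
-- def subtract_variants_from_region(region_variants, chrom, start, end):
--     """
--     Subtract variants from a BED region [start, end) using the pre-retrieved list of variant positions.
--     Returns the updated list of regions after removing variants.
--     """
--     new_regions = []
--     current_start = start
--
--     for pos in region_variants:
--         if current_start < pos:
--             new_regions.append(f"{chrom}\t{current_start}\t{pos}\n")
--         current_start = pos + 1
--
--     if current_start < end:
--         new_regions.append(f"{chrom}\t{current_start}\t{end}\n")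
--
--     return new_regions
-- ===== SOURCE B (Python) =====
-- def subtract_variants_from_region(region_variants, chrom, start, end):
--     """Pairwise sweep over a prebuilt boundary list instead of a running current_start."""
--     seq = [start - 1] + list(region_variants) + [end]
--     return [f"{chrom}\t{a + 1}\t{b}\n" for a, b in zip(seq, seq[1:]) if a + 1 < b]
-- ===== Notes on version B (the rewrite author's own statement) =====
-- stated objective: simpler
-- what changed: Replaces the mutable running current_start loop by building one boundary list [start-1]+variants+[end] and emitting a line for each adjacent pair (a,b) with a+1 < b, as a single comprehension.
import Mathlib
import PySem

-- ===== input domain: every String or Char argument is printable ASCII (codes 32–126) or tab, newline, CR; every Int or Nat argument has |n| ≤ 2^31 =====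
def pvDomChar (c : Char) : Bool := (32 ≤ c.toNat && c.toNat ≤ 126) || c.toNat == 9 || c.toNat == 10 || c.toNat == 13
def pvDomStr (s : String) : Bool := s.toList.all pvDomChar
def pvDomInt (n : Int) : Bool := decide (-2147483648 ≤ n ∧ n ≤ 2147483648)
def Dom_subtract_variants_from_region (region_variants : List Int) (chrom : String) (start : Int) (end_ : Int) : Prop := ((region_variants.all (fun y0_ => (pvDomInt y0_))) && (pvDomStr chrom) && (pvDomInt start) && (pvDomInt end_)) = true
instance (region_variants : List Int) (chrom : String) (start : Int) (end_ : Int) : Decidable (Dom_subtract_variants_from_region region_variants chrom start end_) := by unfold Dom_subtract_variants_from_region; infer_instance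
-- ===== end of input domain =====

-- B replaces A's mutable running current_start by a prebuilt boundary list swept pairwise (simpler decomposition, same cost); proven equal to A.


-- ===== PORT A =====
-- f"{chrom}\t{a}\t{b}\n"
def aLine (chrom : String) (a b : Int) : String :=
  chrom ++ "\t" ++ PySem.Int.toStr a ++ "\t" ++ PySem.Int.toStr b ++ "\n"

def subtract_variants_from_region (region_variants : List Int) (chrom : String) (start : Int) (end_ : Int) : List String :=
  let st := region_variants.foldl
    (fun (st : List String × Int) pos =>
      (if st.2 < pos then st.1 ++ [aLine chrom st.2 pos] else st.1, pos + 1))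
    ([], start)
  if st.2 < end_ then st.1 ++ [aLine chrom st.2 end_] else st.1

-- ===== PORT B =====
-- f"{chrom}\t{a + 1}\t{b}\n"
def bLine (chrom : String) (a b : Int) : String :=
  chrom ++ "\t" ++ PySem.Int.toStr (a + 1) ++ "\t" ++ PySem.Int.toStr b ++ "\n"

def subtract_variants_from_region_alt (region_variants : List Int) (chrom : String) (start : Int) (end_ : Int) : List String :=
  let seq := (start - 1) :: region_variants ++ [end_]
  (seq.zip seq.tail).flatMap
    (fun p => if p.1 + 1 < p.2 then [bLine chrom p.1 p.2] else [])

-- ===== PRECONDITION & SPEC =====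
def Spec_subtract_variants_from_region (region_variants : List Int) (chrom : String) (start : Int) (end_ : Int) (out : List String) : Prop := out = subtract_variants_from_region_alt region_variants chrom start end_
instance (region_variants : List Int) (chrom : String) (start : Int) (end_ : Int) (out : List String) : Decidable (Spec_subtract_variants_from_region region_variants chrom start end_ out) := by unfold Spec_subtract_variants_from_region; infer_instance

-- ===== CLAIM (what is proved, stated in full; the proofs are below) =====
def Claim_equal_subtract_variants_from_region : Prop := ∀ (region_variants : List Int) (chrom : String) (start : Int) (end_ : Int), Dom_subtract_variants_from_region region_variants chrom start end_ → Spec_subtract_variants_from_region region_variants chrom start end_ (subtract_variants_from_region region_variants chrom start end_)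

-- ===== LEMMAS AND PROOFS =====

-- A's fold with a nonempty accumulator is the accumulator followed by the fold from empty.
theorem aFold_acc (rv : List Int) (chrom : String) (acc : List String) (s : Int) :
    rv.foldl
      (fun (st : List String × Int) pos =>
        (if st.2 < pos then st.1 ++ [aLine chrom st.2 pos] else st.1, pos + 1))
      (acc, s)
    = (acc ++ (rv.foldl
      (fun (st : List String × Int) pos =>
        (if st.2 < pos then st.1 ++ [aLine chrom st.2 pos] else st.1, pos + 1))
      ([], s)).1,
      (rv.foldl
      (fun (st : List String × Int) pos =>
        (if st.2 < pos then st.1 ++ [aLine chrom st.2 pos] else st.1, pos + 1))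
      ([], s)).2) := by
  induction rv generalizing acc s with
  | nil => simp
  | cons p rv ih =>
    simp only [List.foldl_cons]
    rw [ih]
    conv_rhs => rw [ih]
    split_ifs <;> simp

theorem main_eq (rv : List Int) (chrom : String) (s e : Int) :
    subtract_variants_from_region rv chrom s e
      = subtract_variants_from_region_alt rv chrom s e := by
  induction rv generalizing s with
  | nil =>
    have h1 : s - 1 + 1 = s := by omega
    simp only [subtract_variants_from_region, subtract_variants_from_region_alt,
      List.foldl_nil, List.nil_append]
    simp [aLine, bLine, h1]
  | cons p rv ih =>
    have h1 : s - 1 + 1 = s := by omega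
    have hIH := ih (p + 1)
    simp only [subtract_variants_from_region, subtract_variants_from_region_alt] at hIH ⊢
    rw [show p + 1 - 1 = p from by omega] at hIH
    simp only [List.foldl_cons, List.cons_append, List.zip_cons_cons, List.tail_cons,
      List.flatMap_cons] at hIH ⊢
    rw [aFold_acc, List.append_assoc,
      ← apply_ite (fun (x : List String) => (if s < p then [] ++ [aLine chrom s p] else []) ++ x),
      hIH]
    congr 1
    split_ifs with ha hb hb <;> first
      | rfl
      | (exfalso; omega)
      | simp [aLine, bLine, h1]

-- ===== VERDICT (by name: the statement is the Claim_ definition above) =====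
theorem subtract_variants_from_region_spec : Claim_equal_subtract_variants_from_region := by
  intro rv chrom s e _
  unfold Spec_subtract_variants_from_region
  exact main_eq rv chrom s e
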